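-- pv_equiv track=rewrite | github.com/Dooques/day_85_watermarking_app | window.py | check_length
-- ===== SOURCE A (Python) =====
-- def check_length(w_mark):
--     upper = 35
--     lower = 25
--     length_list = []
--     for item in w_mark:
--         if item.isupper():
--             length_list.append(upper)
--         else:
--             length_list.append(lower)
--     total_length = 0
--     for item in length_list:
--         total_length += item
--     return total_length
-- ===== SOURCE B (Python) =====
-- def check_length(w_mark):
--     total = 0
--     uppers = 0
--     for c in w_mark:
--         total += 1
--         if c.isupper():
--             uppers += 1
--     return uppers * 35 + (total - uppers) * 25
-- ===== Notes on version B (the rewrite author's own statement) =====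
-- stated objective: simpler
-- what changed: Replaces building a per-character weight list and then summing it with a single counting pass (total and uppercase counts) followed by a closed-form arithmetic expression, avoiding list construction.
import Mathlib
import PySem

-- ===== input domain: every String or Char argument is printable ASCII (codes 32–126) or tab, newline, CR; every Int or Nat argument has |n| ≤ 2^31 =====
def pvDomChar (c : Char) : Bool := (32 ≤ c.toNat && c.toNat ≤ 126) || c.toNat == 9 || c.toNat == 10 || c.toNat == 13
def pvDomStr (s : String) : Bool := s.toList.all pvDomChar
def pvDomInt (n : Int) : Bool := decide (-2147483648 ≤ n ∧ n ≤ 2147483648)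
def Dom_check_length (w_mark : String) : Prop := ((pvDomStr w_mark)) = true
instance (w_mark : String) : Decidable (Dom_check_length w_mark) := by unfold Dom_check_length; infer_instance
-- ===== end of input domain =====

-- B replaces the build-a-weight-list-then-sum pair of loops with one counting pass plus a closed-form expression (simpler).


-- ===== PORT A =====
def check_length (w_mark : String) : Int :=
  let upper : Int := 35
  let lower : Int := 25
  let length_list : List Int :=
    w_mark.toList.foldl (fun acc item =>
      if PySem.Chars.isupper item then acc ++ [upper] else acc ++ [lower]) []
  length_list.foldl (fun total_length item => total_length + item) 0

-- ===== PORT B =====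
def check_length_alt (w_mark : String) : Int :=
  let st :=
    w_mark.toList.foldl (fun (p : Int × Int) c =>
      (p.1 + 1, if PySem.Chars.isupper c then p.2 + 1 else p.2)) (0, 0)
  st.2 * 35 + (st.1 - st.2) * 25

-- ===== PRECONDITION & SPEC =====
def Spec_check_length (w_mark : String) (out : Int) : Prop := out = check_length_alt w_mark
instance (w_mark : String) (out : Int) : Decidable (Spec_check_length w_mark out) := by unfold Spec_check_length; infer_instance

-- ===== CLAIM (what is proved, stated in full; the proofs are below) =====
def Claim_equal_check_length : Prop := ∀ (w_mark : String), Dom_check_length w_mark → Spec_check_length w_mark (check_length w_mark)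

-- ===== LEMMAS AND PROOFS =====

-- invariant: A's (sum of list built so far) equals B's counts combined, for any suffix of characters
lemma check_length_loop (cs : List Char) (acc : List Int) (t u : Int)
    (h : acc.foldl (fun x y => x + y) 0 = u * 35 + (t - u) * 25) :
    (cs.foldl (fun a item =>
        if PySem.Chars.isupper item then a ++ [(35 : Int)] else a ++ [(25 : Int)]) acc).foldl
        (fun x y => x + y) 0
      = (cs.foldl (fun (p : Int × Int) c =>
          (p.1 + 1, if PySem.Chars.isupper c then p.2 + 1 else p.2)) (t, u)).2 * 35
        + ((cs.foldl (fun (p : Int × Int) c =>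
          (p.1 + 1, if PySem.Chars.isupper c then p.2 + 1 else p.2)) (t, u)).1
          - (cs.foldl (fun (p : Int × Int) c =>
          (p.1 + 1, if PySem.Chars.isupper c then p.2 + 1 else p.2)) (t, u)).2) * 25 := by
  induction cs generalizing acc t u with
  | nil => simpa using h
  | cons c cs ih =>
    simp only [List.foldl_cons]
    by_cases hc : PySem.Chars.isupper c = true
    · simp only [hc, if_true]
      apply ih
      have : (acc ++ [(35 : Int)]).foldl (fun x y => x + y) 0
          = acc.foldl (fun x y => x + y) 0 + 35 := by
        simp [List.foldl_append]
      rw [this, h]; ring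
    · simp only [hc, Bool.false_eq_true, if_false]
      apply ih
      have : (acc ++ [(25 : Int)]).foldl (fun x y => x + y) 0
          = acc.foldl (fun x y => x + y) 0 + 25 := by
        simp [List.foldl_append]
      rw [this, h]; ring

-- ===== VERDICT (by name: the statement is the Claim_ definition above) =====
theorem check_length_spec : Claim_equal_check_length := by
  intro w _
  unfold Spec_check_length check_length check_length_alt
  simpa using check_length_loop w.toList [] 0 0 (by norm_num)
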